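-- pv_equiv track=rewrite | github.com/VCCharlie/Climbfinder-lists | streamlit_app.py | _looks_like_climb
-- ===== SOURCE A (Python) =====
-- def _looks_like_climb(d):
--     keys_lower = {k.lower() for k in d.keys()}
--     if not (keys_lower & {"name", "title", "climb", "climbname", "climb_name"}):
--         return False
--     cats = 0
--     if keys_lower & {"length", "distance", "km", "length_km"}:
--         cats += 1
--     if keys_lower & {"gradient", "avg_gradient", "avggradient", "avg_gradient_pct", "averagegradient"}:
--         cats += 1
--     if keys_lower & {"difficulty", "points", "difficultypoints", "difficulty_points", "score", "rating"}:
--         cats += 1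
--     if keys_lower & {"rank", "position", "ranking"}:
--         cats += 1
--     if keys_lower & {"elevation", "elevationgain", "elevation_gain", "height", "altitude"}:
--         cats += 1
--     return cats >= 2
-- ===== SOURCE B (Python) =====
-- _CATEGORY = {
--     kw: cat
--     for cat, kws in [
--         ("name", ("name", "title", "climb", "climbname", "climb_name")),
--         ("len", ("length", "distance", "km", "length_km")),
--         ("grad", ("gradient", "avg_gradient", "avggradient", "avg_gradient_pct", "averagegradient")),
--         ("diff", ("difficulty", "points", "difficultypoints", "difficulty_points", "score", "rating")),
--         ("rank", ("rank", "position", "ranking")),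
--         ("elev", ("elevation", "elevationgain", "elevation_gain", "height", "altitude")),
--     ]
--     for kw in kws
-- }
--
--
-- def _looks_like_climb(d):
--     hit = set()
--     for k in d.keys():
--         cat = _CATEGORY.get(k.lower())
--         if cat is not None:
--             hit.add(cat)
--     return "name" in hit and len(hit - {"name"}) >= 2
-- ===== Notes on version B (the rewrite author's own statement) =====
-- stated objective: idiomatic
-- what changed: Instead of building a set of lowered keys and intersecting it with five fixed keyword sets, B makes one pass over the input keys, classifies each key via a single keyword-to-category dict, and tests the resulting category set.
import Mathlib
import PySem

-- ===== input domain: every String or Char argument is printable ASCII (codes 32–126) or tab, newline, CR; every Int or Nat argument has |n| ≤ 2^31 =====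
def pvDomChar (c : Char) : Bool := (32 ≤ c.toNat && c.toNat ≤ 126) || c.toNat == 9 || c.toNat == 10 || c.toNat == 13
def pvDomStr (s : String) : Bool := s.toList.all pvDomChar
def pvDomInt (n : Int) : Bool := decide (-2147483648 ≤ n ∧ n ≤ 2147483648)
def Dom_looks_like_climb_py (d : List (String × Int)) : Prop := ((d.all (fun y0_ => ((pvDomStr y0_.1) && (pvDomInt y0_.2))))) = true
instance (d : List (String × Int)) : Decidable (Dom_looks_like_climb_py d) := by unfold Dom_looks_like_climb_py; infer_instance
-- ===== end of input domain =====

-- B is a more idiomatic re-implementation: one pass over the input keys classifying each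
-- through a single keyword→category dict, instead of five fixed-set intersections.

-- ===== PORT A =====
def grpName : List String := ["name", "title", "climb", "climbname", "climb_name"]
def grpLen : List String := ["length", "distance", "km", "length_km"]
def grpGrad : List String := ["gradient", "avg_gradient", "avggradient", "avg_gradient_pct", "averagegradient"]
def grpDiff : List String := ["difficulty", "points", "difficultypoints", "difficulty_points", "score", "rating"]
def grpRank : List String := ["rank", "position", "ranking"]
def grpElev : List String := ["elevation", "elevationgain", "elevation_gain", "height", "altitude"]

def looks_like_climb_py (d : List (String × Int)) : Bool :=
  let keysLower : PySem.Set String := PySem.Set.ofList (d.map (fun p => PySem.Str.lower p.1))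
  if (PySem.Set.inter keysLower (PySem.Set.ofList grpName)).isEmpty then false
  else
    let cats : Int := 0
    let cats := if !(PySem.Set.inter keysLower (PySem.Set.ofList grpLen)).isEmpty then cats + 1 else cats
    let cats := if !(PySem.Set.inter keysLower (PySem.Set.ofList grpGrad)).isEmpty then cats + 1 else cats
    let cats := if !(PySem.Set.inter keysLower (PySem.Set.ofList grpDiff)).isEmpty then cats + 1 else cats
    let cats := if !(PySem.Set.inter keysLower (PySem.Set.ofList grpRank)).isEmpty then cats + 1 else cats
    let cats := if !(PySem.Set.inter keysLower (PySem.Set.ofList grpElev)).isEmpty then cats + 1 else cats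
    decide (2 ≤ cats)

-- ===== PORT B =====
def climbTable : PySem.Dict String String :=
  PySem.Dict.mk [("name", "name"), ("title", "name"), ("climb", "name"), ("climbname", "name"), ("climb_name", "name"),
   ("length", "len"), ("distance", "len"), ("km", "len"), ("length_km", "len"),
   ("gradient", "grad"), ("avg_gradient", "grad"), ("avggradient", "grad"), ("avg_gradient_pct", "grad"), ("averagegradient", "grad"),
   ("difficulty", "diff"), ("points", "diff"), ("difficultypoints", "diff"), ("difficulty_points", "diff"), ("score", "diff"), ("rating", "diff"),
   ("rank", "rank"), ("position", "rank"), ("ranking", "rank"),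
   ("elevation", "elev"), ("elevationgain", "elev"), ("elevation_gain", "elev"), ("height", "elev"), ("altitude", "elev")]

def looks_like_climb_py_alt (d : List (String × Int)) : Bool :=
  let hit : PySem.Set String := d.foldl (fun h p =>
    match PySem.Dict.get? climbTable (PySem.Str.lower p.1) with
    | some c => PySem.Set.add h c
    | none => h) PySem.Set.empty
  PySem.Set.contains hit "name" && decide (2 ≤ (PySem.Set.diff hit (PySem.Set.ofList ["name"])).length)

-- ===== PRECONDITION & SPEC =====
def Spec_looks_like_climb_py (d : List (String × Int)) (out : Bool) : Prop := out = looks_like_climb_py_alt d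
instance (d : List (String × Int)) (out : Bool) : Decidable (Spec_looks_like_climb_py d out) := by unfold Spec_looks_like_climb_py; infer_instance

-- ===== CLAIM (what is proved, stated in full; the proofs are below) =====
def Claim_equal_looks_like_climb_py : Prop := ∀ (d : List (String × Int)), Dom_looks_like_climb_py d → Spec_looks_like_climb_py d (looks_like_climb_py d)

-- ===== LEMMAS AND PROOFS =====

-- the one-line existence test both programs decide, per keyword group
def hasKeyB (d : List (String × Int)) (g : List String) : Bool :=
  d.any (fun p => decide (PySem.Str.lower p.1 ∈ g))

lemma hasKeyB_iff (d : List (String × Int)) (g : List String) :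
    hasKeyB d g = true ↔ ∃ p ∈ d, PySem.Str.lower p.1 ∈ g := by
  simp [hasKeyB]

lemma inter_isEmpty (d : List (String × Int)) (g : List String) :
    (PySem.Set.inter (PySem.Set.ofList (d.map (fun p => PySem.Str.lower p.1)))
      (PySem.Set.ofList g)).isEmpty = !hasKeyB d g := by
  by_cases h : ∃ p ∈ d, PySem.Str.lower p.1 ∈ g
  · rw [(hasKeyB_iff d g).mpr h, Bool.not_true]
    rw [List.isEmpty_eq_false_iff_exists_mem]
    obtain ⟨p, hp, hg⟩ := h
    exact ⟨PySem.Str.lower p.1, by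
      rw [PySem.Set.mem_inter, PySem.Set.mem_ofList, PySem.Set.mem_ofList]
      exact ⟨List.mem_map_of_mem hp, hg⟩⟩
  · rw [Bool.eq_false_iff.mpr (fun hb => h ((hasKeyB_iff d g).mp hb)), Bool.not_false]
    rw [List.isEmpty_iff, List.eq_nil_iff_forall_not_mem]
    intro x hx
    rw [PySem.Set.mem_inter, PySem.Set.mem_ofList, PySem.Set.mem_ofList, List.mem_map] at hx
    obtain ⟨⟨p, hp, rfl⟩, hg⟩ := hx
    exact h ⟨p, hp, hg⟩

set_option maxHeartbeats 1000000 in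
lemma table_char (s c : String) : PySem.Dict.get? climbTable s = some c ↔
    (s ∈ grpName ∧ c = "name") ∨ (s ∈ grpLen ∧ c = "len") ∨ (s ∈ grpGrad ∧ c = "grad") ∨
    (s ∈ grpDiff ∧ c = "diff") ∨ (s ∈ grpRank ∧ c = "rank") ∨ (s ∈ grpElev ∧ c = "elev") := by
  rw [PySem.Dict.get?_eq_some_iff_mem_items climbTable s c (by decide)]
  simp only [climbTable, List.mem_cons, Prod.mk.injEq, List.not_mem_nil,
    or_false, grpName, grpLen, grpGrad, grpDiff, grpRank, grpElev, or_and_right, or_assoc]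

lemma get_name (s : String) : PySem.Dict.get? climbTable s = some "name" ↔ s ∈ grpName := by
  rw [table_char]; simp

lemma get_len (s : String) : PySem.Dict.get? climbTable s = some "len" ↔ s ∈ grpLen := by
  rw [table_char]; simp

lemma get_grad (s : String) : PySem.Dict.get? climbTable s = some "grad" ↔ s ∈ grpGrad := by
  rw [table_char]; simp

lemma get_diff (s : String) : PySem.Dict.get? climbTable s = some "diff" ↔ s ∈ grpDiff := by
  rw [table_char]; simp

lemma get_rank (s : String) : PySem.Dict.get? climbTable s = some "rank" ↔ s ∈ grpRank := by
  rw [table_char]; simp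

lemma get_elev (s : String) : PySem.Dict.get? climbTable s = some "elev" ↔ s ∈ grpElev := by
  rw [table_char]; simp

def hitFold (d : List (String × Int)) (s : PySem.Set String) : PySem.Set String :=
  d.foldl (fun h p =>
    match PySem.Dict.get? climbTable (PySem.Str.lower p.1) with
    | some c => PySem.Set.add h c
    | none => h) s

lemma mem_hitFold (d : List (String × Int)) (s : PySem.Set String) (x : String) :
    x ∈ hitFold d s ↔ x ∈ s ∨ ∃ p ∈ d, PySem.Dict.get? climbTable (PySem.Str.lower p.1) = some x := by
  induction d generalizing s with
  | nil => simp [hitFold]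
  | cons p t ih =>
    simp only [hitFold, List.foldl_cons] at *
    cases hget : PySem.Dict.get? climbTable (PySem.Str.lower p.1) with
    | none =>
      rw [ih]
      simp only [List.mem_cons]
      constructor
      · rintro (h | ⟨q, hq, hqs⟩)
        · exact Or.inl h
        · exact Or.inr ⟨q, Or.inr hq, hqs⟩
      · rintro (h | ⟨q, rfl | hq, hqs⟩)
        · exact Or.inl h
        · rw [hget] at hqs; cases hqs
        · exact Or.inr ⟨q, hq, hqs⟩
    | some c =>
      rw [ih, PySem.Set.mem_add]
      simp only [List.mem_cons]
      constructor
      · rintro (⟨h | rfl⟩ | ⟨q, hq, hqs⟩)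
        · exact Or.inl h
        · exact Or.inr ⟨p, Or.inl rfl, hget⟩
        · exact Or.inr ⟨q, Or.inr hq, hqs⟩
      · rintro (h | ⟨q, rfl | hq, hqs⟩)
        · exact Or.inl (Or.inl h)
        · rw [hget] at hqs; injection hqs with h2; exact Or.inl (Or.inr h2.symm)
        · exact Or.inr ⟨q, hq, hqs⟩

lemma nodup_hitFold (d : List (String × Int)) (s : PySem.Set String) (hs : s.Nodup) :
    (hitFold d s).Nodup := by
  induction d generalizing s with
  | nil => exact hs
  | cons p t ih =>
    simp only [hitFold, List.foldl_cons] at *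
    cases hget : PySem.Dict.get? climbTable (PySem.Str.lower p.1) with
    | none => exact ih s hs
    | some c => exact ih (PySem.Set.add s c) (PySem.Set.nodup_add s c hs)

-- the category list B's hit set (minus "name") is a permutation of
-- one `cats += 1` step of A
def catStep (b : Bool) (n : Int) : Int := if b then n + 1 else n

def mkL (b2 b3 b4 b5 b6 : Bool) : List String :=
  (if b2 then ["len"] else []) ++ (if b3 then ["grad"] else []) ++ (if b4 then ["diff"] else []) ++
  (if b5 then ["rank"] else []) ++ (if b6 then ["elev"] else [])

lemma mem_mkL (b2 b3 b4 b5 b6 : Bool) (x : String) :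
    x ∈ mkL b2 b3 b4 b5 b6 ↔
      (b2 = true ∧ x = "len") ∨ (b3 = true ∧ x = "grad") ∨ (b4 = true ∧ x = "diff") ∨
      (b5 = true ∧ x = "rank") ∨ (b6 = true ∧ x = "elev") := by
  simp only [mkL, List.mem_append]
  cases b2 <;> cases b3 <;> cases b4 <;> cases b5 <;> cases b6 <;> simp [or_assoc]

lemma nodup_mkL (b2 b3 b4 b5 b6 : Bool) : (mkL b2 b3 b4 b5 b6).Nodup := by
  cases b2 <;> cases b3 <;> cases b4 <;> cases b5 <;> cases b6 <;> decide

lemma hit_name (d : List (String × Int)) :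
    PySem.Set.contains (hitFold d PySem.Set.empty) "name" = hasKeyB d grpName := by
  rw [Bool.eq_iff_iff, PySem.Set.contains_iff, hasKeyB_iff, mem_hitFold]
  simp only [PySem.Set.empty, List.not_mem_nil, false_or]
  constructor
  · rintro ⟨p, hp, hget⟩
    exact ⟨p, hp, (get_name _).mp hget⟩
  · rintro ⟨p, hp, hmem⟩
    exact ⟨p, hp, (get_name _).mpr hmem⟩

lemma hit_diff_length (d : List (String × Int)) :
    (PySem.Set.diff (hitFold d PySem.Set.empty) (PySem.Set.ofList ["name"])).length =
      (mkL (hasKeyB d grpLen) (hasKeyB d grpGrad) (hasKeyB d grpDiff)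
        (hasKeyB d grpRank) (hasKeyB d grpElev)).length := by
  apply List.Perm.length_eq
  rw [List.perm_ext_iff_of_nodup
    (PySem.Set.nodup_diff _ _ (nodup_hitFold d PySem.Set.empty List.nodup_nil))
    (nodup_mkL _ _ _ _ _)]
  intro x
  rw [PySem.Set.mem_diff, mem_hitFold, mem_mkL]
  simp only [PySem.Set.empty, List.not_mem_nil, false_or, PySem.Set.mem_ofList,
    List.mem_singleton, hasKeyB_iff]
  constructor
  · rintro ⟨⟨p, hp, hget⟩, hnn⟩
    rcases (table_char _ _).mp hget with ⟨h, rfl⟩ | ⟨h, rfl⟩ | ⟨h, rfl⟩ | ⟨h, rfl⟩ | ⟨h, rfl⟩ | ⟨h, rfl⟩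
    · exact absurd rfl hnn
    · exact Or.inl ⟨⟨p, hp, h⟩, rfl⟩
    · exact Or.inr (Or.inl ⟨⟨p, hp, h⟩, rfl⟩)
    · exact Or.inr (Or.inr (Or.inl ⟨⟨p, hp, h⟩, rfl⟩))
    · exact Or.inr (Or.inr (Or.inr (Or.inl ⟨⟨p, hp, h⟩, rfl⟩)))
    · exact Or.inr (Or.inr (Or.inr (Or.inr ⟨⟨p, hp, h⟩, rfl⟩)))
  · rintro (⟨⟨p, hp, h⟩, rfl⟩ | ⟨⟨p, hp, h⟩, rfl⟩ | ⟨⟨p, hp, h⟩, rfl⟩ | ⟨⟨p, hp, h⟩, rfl⟩ | ⟨⟨p, hp, h⟩, rfl⟩)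
    · exact ⟨⟨p, hp, (get_len _).mpr h⟩, by decide⟩
    · exact ⟨⟨p, hp, (get_grad _).mpr h⟩, by decide⟩
    · exact ⟨⟨p, hp, (get_diff _).mpr h⟩, by decide⟩
    · exact ⟨⟨p, hp, (get_rank _).mpr h⟩, by decide⟩
    · exact ⟨⟨p, hp, (get_elev _).mpr h⟩, by decide⟩

-- ===== VERDICT (by name: the statement is the Claim_ definition above) =====
theorem looks_like_climb_py_spec : Claim_equal_looks_like_climb_py := by
  intro d _
  unfold Spec_looks_like_climb_py
  have ha : looks_like_climb_py d =
      (if (PySem.Set.inter (PySem.Set.ofList (d.map (fun p => PySem.Str.lower p.1))) (PySem.Set.ofList grpName)).isEmpty then false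
       else decide (2 ≤ catStep (!(PySem.Set.inter (PySem.Set.ofList (d.map (fun p => PySem.Str.lower p.1))) (PySem.Set.ofList grpElev)).isEmpty)
         (catStep (!(PySem.Set.inter (PySem.Set.ofList (d.map (fun p => PySem.Str.lower p.1))) (PySem.Set.ofList grpRank)).isEmpty)
          (catStep (!(PySem.Set.inter (PySem.Set.ofList (d.map (fun p => PySem.Str.lower p.1))) (PySem.Set.ofList grpDiff)).isEmpty)
           (catStep (!(PySem.Set.inter (PySem.Set.ofList (d.map (fun p => PySem.Str.lower p.1))) (PySem.Set.ofList grpGrad)).isEmpty)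
            (catStep (!(PySem.Set.inter (PySem.Set.ofList (d.map (fun p => PySem.Str.lower p.1))) (PySem.Set.ofList grpLen)).isEmpty) 0)))))) := rfl
  have hb : looks_like_climb_py_alt d =
      (PySem.Set.contains (hitFold d PySem.Set.empty) "name" &&
        decide (2 ≤ (PySem.Set.diff (hitFold d PySem.Set.empty) (PySem.Set.ofList ["name"])).length)) := rfl
  rw [ha, hb, hit_name, hit_diff_length]
  rw [inter_isEmpty, inter_isEmpty, inter_isEmpty, inter_isEmpty, inter_isEmpty, inter_isEmpty]
  simp only [Bool.not_not]
  generalize hasKeyB d grpName = b1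
  generalize hasKeyB d grpLen = b2
  generalize hasKeyB d grpGrad = b3
  generalize hasKeyB d grpDiff = b4
  generalize hasKeyB d grpRank = b5
  generalize hasKeyB d grpElev = b6
  revert b1 b2 b3 b4 b5 b6
  decide
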